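-- pv_equiv track=rewrite | github.com/Hofei90/pwm_fan_control_pi4 | fan_control.py | generate_all_temperatures_dutycycles
-- ===== SOURCE A (Python) =====
-- STEP_WIDTH = 5
--
-- def generate_all_temperatures_dutycycles(temperatures_dutycycles):
--     last_data = 0
--     all_temperatures_dutycycles = {}
--     for temperature in range(0, 100 + STEP_WIDTH, STEP_WIDTH):
--         if temperature in temperatures_dutycycles:
--             all_temperatures_dutycycles[temperature] = temperatures_dutycycles[temperature]
--             last_data = temperatures_dutycycles[temperature]
--         else:
--             all_temperatures_dutycycles[temperature] = last_data
--     return all_temperatures_dutycycles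
-- ===== SOURCE B (Python) =====
-- STEP_WIDTH = 5
--
--
-- def generate_all_temperatures_dutycycles(temperatures_dutycycles):
--     # Each grid temperature is computed independently: scan backwards from it
--     # to the nearest step boundary that is present in the input (default 0).
--     all_temperatures_dutycycles = {}
--     for temperature in range(0, 100 + STEP_WIDTH, STEP_WIDTH):
--         value = 0
--         for step in range(temperature, -1, -STEP_WIDTH):
--             if step in temperatures_dutycycles:
--                 value = temperatures_dutycycles[step]
--                 break
--         all_temperatures_dutycycles[temperature] = value
--     return all_temperatures_dutycycles
-- ===== Notes on version B (the rewrite author's own statement) =====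
-- stated objective: alternative
-- what changed: Replaces the single stateful forward-fill pass with its carry variable by an independent backward scan per grid temperature: each output entry is the input value at the nearest present step boundary at or below it, else 0.
import Mathlib
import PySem

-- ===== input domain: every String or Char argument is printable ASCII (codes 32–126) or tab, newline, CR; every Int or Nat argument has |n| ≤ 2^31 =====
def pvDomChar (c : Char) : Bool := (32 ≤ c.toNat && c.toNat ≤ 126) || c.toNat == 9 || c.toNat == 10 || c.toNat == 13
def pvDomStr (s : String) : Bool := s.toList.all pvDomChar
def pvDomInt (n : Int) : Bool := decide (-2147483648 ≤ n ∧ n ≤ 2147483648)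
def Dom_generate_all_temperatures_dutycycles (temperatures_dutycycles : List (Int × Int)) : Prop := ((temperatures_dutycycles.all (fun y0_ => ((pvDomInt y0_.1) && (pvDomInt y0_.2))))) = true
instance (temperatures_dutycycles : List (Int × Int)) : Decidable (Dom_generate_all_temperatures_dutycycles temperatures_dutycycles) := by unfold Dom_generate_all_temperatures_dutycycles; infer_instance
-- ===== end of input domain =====

-- B replaces A's stateful forward-fill carry by an independent backward scan per grid
-- temperature (nearest present step boundary at or below it, default 0); same cost class.


-- ===== PORT A =====
-- loop body of A: state = (last_data, all_temperatures_dutycycles)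
def pvStepA (temperatures_dutycycles : List (Int × Int))
    (st : Int × PySem.Dict Int Int) (temperature : Int) : Int × PySem.Dict Int Int :=
  match (PySem.Dict.mk temperatures_dutycycles).get? temperature with
  | some v => (v, st.2.insert temperature v)          -- temperature in dict: store and update last_data
  | none   => (st.1, st.2.insert temperature st.1)    -- else: forward-fill last_data

def generate_all_temperatures_dutycycles (temperatures_dutycycles : List (Int × Int)) : List (Int × Int) :=
  (((PySem.List.pyRange 0 (100 + 5) 5).foldl (pvStepA temperatures_dutycycles)
      (0, PySem.Dict.empty)).2).items

-- ===== PORT B =====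
-- inner loop of B: first present step boundary scanning down from temperature, default 0
def pvBackLookup (temperatures_dutycycles : List (Int × Int)) (temperature : Int) : Int :=
  match (PySem.List.pyRange temperature (-1) (-5)).findSome?
      (fun step => (PySem.Dict.mk temperatures_dutycycles).get? step) with
  | some v => v
  | none   => 0

def generate_all_temperatures_dutycycles_alt (temperatures_dutycycles : List (Int × Int)) : List (Int × Int) :=
  ((PySem.List.pyRange 0 (100 + 5) 5).foldl
      (fun d temperature => d.insert temperature (pvBackLookup temperatures_dutycycles temperature))
      PySem.Dict.empty).items

-- ===== PRECONDITION & SPEC =====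
def Spec_generate_all_temperatures_dutycycles (temperatures_dutycycles : List (Int × Int)) (out : List (Int × Int)) : Prop := out = generate_all_temperatures_dutycycles_alt temperatures_dutycycles
instance (temperatures_dutycycles : List (Int × Int)) (out : List (Int × Int)) : Decidable (Spec_generate_all_temperatures_dutycycles temperatures_dutycycles out) := by unfold Spec_generate_all_temperatures_dutycycles; infer_instance

-- ===== CLAIM (what is proved, stated in full; the proofs are below) =====
def Claim_equal_generate_all_temperatures_dutycycles : Prop := ∀ (temperatures_dutycycles : List (Int × Int)), Dom_generate_all_temperatures_dutycycles temperatures_dutycycles → Spec_generate_all_temperatures_dutycycles temperatures_dutycycles (generate_all_temperatures_dutycycles temperatures_dutycycles)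

-- ===== LEMMAS AND PROOFS =====

-- proof-only description of A's fold output (the carried pairs)
def pvCarry (temperatures_dutycycles : List (Int × Int)) (L : Int) : List Int → List (Int × Int)
  | [] => []
  | t :: g =>
    match (PySem.Dict.mk temperatures_dutycycles).get? t with
    | some v => (t, v) :: pvCarry temperatures_dutycycles v g
    | none   => (t, L) :: pvCarry temperatures_dutycycles L g

-- proof-only view of the grid [5i, 5(i+1), …] with n points
def pvGridFrom (i : Nat) : Nat → List Int
  | 0 => []
  | n + 1 => (5 * (i : Int)) :: pvGridFrom (i + 1) n

theorem pvFoldA_items (td : List (Int × Int)) :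
    ∀ (g : List Int) (L : Int) (d : PySem.Dict Int Int),
      g.Nodup → (∀ t ∈ g, d.contains t = false) →
      ((g.foldl (pvStepA td) (L, d)).2).items = d.items ++ pvCarry td L g := by
  intro g
  induction g with
  | nil => intro L d _ _; simp [pvCarry]
  | cons t g ih =>
    intro L d hnd hfresh
    have hdt : d.contains t = false := hfresh t (by simp)
    have hnd' : g.Nodup := (List.nodup_cons.mp hnd).2
    have hfresh' : ∀ (x : Int) (w : Int), x ∈ g → (d.insert t w).contains x = false := by
      intro x w hx
      have hxt : x ≠ t := by
        intro h; subst h; exact (List.nodup_cons.mp hnd).1 hx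
      have hdx : d.contains x = false := hfresh x (by simp [hx])
      simp [PySem.Dict.contains_insert, hxt, hdx]
    cases h : (PySem.Dict.mk td).get? t with
    | some v =>
      have hstep : pvStepA td (L, d) t = (v, d.insert t v) := by simp [pvStepA, h]
      rw [List.foldl_cons, hstep, ih v (d.insert t v) hnd' (fun x hx => hfresh' x v hx)]
      rw [PySem.Dict.items_insert_of_not_contains _ _ hdt]
      simp [pvCarry, h]
    | none =>
      have hstep : pvStepA td (L, d) t = (L, d.insert t L) := by simp [pvStepA, h]
      rw [List.foldl_cons, hstep, ih L (d.insert t L) hnd' (fun x hx => hfresh' x L hx)]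
      rw [PySem.Dict.items_insert_of_not_contains _ _ hdt]
      simp [pvCarry, h]

-- B's dict build: fresh keys append in order
theorem pvFoldB_items (td : List (Int × Int)) :
    ∀ (g : List Int) (d : PySem.Dict Int Int),
      g.Nodup → (∀ t ∈ g, d.contains t = false) →
      ((g.foldl (fun d t => d.insert t (pvBackLookup td t)) d)).items
        = d.items ++ g.map (fun t => (t, pvBackLookup td t)) := by
  intro g
  induction g with
  | nil => intro d _ _; simp
  | cons t g ih =>
    intro d hnd hfresh
    have hdt : d.contains t = false := hfresh t (by simp)
    have hnd' : g.Nodup := (List.nodup_cons.mp hnd).2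
    rw [List.foldl_cons, ih (d.insert t (pvBackLookup td t)) hnd' ?_]
    · rw [PySem.Dict.items_insert_of_not_contains _ _ hdt]
      simp
    · intro x hx
      have hxt : x ≠ t := by
        intro h; subst h; exact (List.nodup_cons.mp hnd).1 hx
      have hdx : d.contains x = false := hfresh x (by simp [hx])
      simp [PySem.Dict.contains_insert, hxt, hdx]

-- one step of the descending range
theorem pvDown_cons (i : Nat) :
    PySem.List.pyRange (5 * (i : Int)) (-1) (-5)
      = (5 * (i : Int)) :: PySem.List.pyRange (5 * (i : Int) - 5) (-1) (-5) := by
  cases i with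
  | zero => decide
  | succ m =>
    push_cast
    unfold PySem.List.pyRange
    split_ifs with h1 h2 h3 h4 h5 h6 h7 h8 <;> try omega
    · have hc1 : ((5 * ((m : Int) + 1) - -1 + - -5 - 1) / - -5).toNat = m + 2 := by
        norm_num
        omega
      have hc2 : ((5 * ((m : Int) + 1) - 5 - -1 + - -5 - 1) / - -5).toNat = m + 1 := by
        norm_num
        omega
      rw [hc1, hc2]
      show (List.range (m + 2)).map (fun (k : Nat) => 5 * ((m : Int) + 1) + -5 * (k : Int))
          = (5 * ((m : Int) + 1))
            :: (List.range (m + 1)).map (fun (k : Nat) => 5 * ((m : Int) + 1) - 5 + -5 * (k : Int))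
      rw [List.range_succ_eq_map, List.map_cons, List.map_map]
      refine List.cons_eq_cons.mpr ⟨by push_cast; ring_nf, ?_⟩
      have hfun : ((fun (k : Nat) => 5 * ((m : Int) + 1) + -5 * (k : Int)) ∘ Nat.succ)
          = fun (k : Nat) => 5 * ((m : Int) + 1) - 5 + -5 * (k : Int) := by
        funext k
        simp only [Function.comp]
        push_cast
        ring
      rw [hfun]

-- recurrence for the backward lookup
theorem pvBack_rec (td : List (Int × Int)) (i : Nat) :
    pvBackLookup td (5 * (i : Int))
      = match (PySem.Dict.mk td).get? (5 * (i : Int)) with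
        | some v => v
        | none   => pvBackLookup td (5 * (i : Int) - 5) := by
  unfold pvBackLookup
  rw [pvDown_cons i, List.findSome?_cons]
  cases (PySem.Dict.mk td).get? (5 * (i : Int)) <;> rfl

theorem pvBack_neg (td : List (Int × Int)) :
    pvBackLookup td (-5) = 0 := by
  have h : PySem.List.pyRange (-5 : Int) (-1) (-5) = [] := by decide
  simp [pvBackLookup, h]

-- core: the carried pairs are exactly the independent backward lookups
theorem pvCarry_eq_back (td : List (Int × Int)) :
    ∀ (n i : Nat),
      pvCarry td (pvBackLookup td (5 * (i : Int) - 5)) (pvGridFrom i n)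
        = (pvGridFrom i n).map (fun t => (t, pvBackLookup td t)) := by
  intro n
  induction n with
  | zero => intro i; simp [pvGridFrom, pvCarry]
  | succ n ih =>
    intro i
    have hnext : 5 * (((i + 1 : Nat) : Int)) - 5 = 5 * (i : Int) := by push_cast; ring
    have hrec := pvBack_rec td i
    cases h : (PySem.Dict.mk td).get? (5 * (i : Int)) with
    | some v =>
      have hb : pvBackLookup td (5 * (i : Int)) = v := by rw [hrec, h]
      have htail := ih (i + 1)
      rw [hnext, hb] at htail
      simp only [pvGridFrom, pvCarry, h, List.map_cons, htail, hb]
    | none =>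
      have hb : pvBackLookup td (5 * (i : Int)) = pvBackLookup td (5 * (i : Int) - 5) := by
        rw [hrec, h]
      have htail := ih (i + 1)
      rw [hnext, hb] at htail
      simp only [pvGridFrom, pvCarry, h, List.map_cons, htail, hb]

-- the concrete grid, as pvGridFrom
theorem pvGrid_eq : PySem.List.pyRange 0 (100 + 5) 5 = pvGridFrom 0 21 := by decide

-- ===== VERDICT (by name: the statement is the Claim_ definition above) =====
theorem generate_all_temperatures_dutycycles_spec : Claim_equal_generate_all_temperatures_dutycycles := by
  intro td _
  unfold Spec_generate_all_temperatures_dutycycles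
  unfold generate_all_temperatures_dutycycles generate_all_temperatures_dutycycles_alt
  rw [pvGrid_eq]
  rw [pvFoldA_items td _ 0 PySem.Dict.empty (by decide)
    (fun t _ => PySem.Dict.contains_empty t)]
  rw [pvFoldB_items td _ PySem.Dict.empty (by decide)
    (fun t _ => PySem.Dict.contains_empty t)]
  have hc := pvCarry_eq_back td 21 0
  have h0 : 5 * ((0 : Nat) : Int) - 5 = -5 := by norm_num
  rw [h0, pvBack_neg td] at hc
  rw [hc]
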